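-- pv_equiv track=rewrite | github.com/EnyewAnberbir/My-A2SV-Progress | leet-code-solutions/smallest-value-of-the-rearranged-number.py | smallestNumber
-- ===== SOURCE A (Python) =====
-- def smallestNumber(num: int) -> int:
--     if num >= 0:
--         coll =[]
--         for i in str(num):
--             coll.append(i)
--         coll.sort()
--         if len(coll) > 1 and int(coll[0]) ==0:
--             for i in range(1, len(coll)):
--                 if int(coll[i]) != 0:
--                     coll[0], coll[i] = coll[i], coll[0]
--                     break
--         coll1 = "".join(coll)
--         temp = int(coll1)
--         return temp
--     else:
--         coll =[]
--         string = str(num)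
--         for i in range(1, len(string)):
--             coll.append(string[i])
--         coll.sort()
--         coll.reverse()
--
--         coll1 = "".join(coll)
--         temp = int(coll1)
--
--         return 0 - temp
-- ===== SOURCE B (Python) =====
-- def smallestNumber(num: int) -> int:
--     s = str(abs(num))
--     if num >= 0:
--         lead = next((d for d in range(1, 10) if s.count(str(d)) > 0), 0)
--         zeros = '0' * s.count('0')
--         rest = ''.join(str(d) * (s.count(str(d)) - (d == lead)) for d in range(1, 10))
--         return int((str(lead) if lead else '') + zeros + rest)
--     else:
--         return -int(''.join(str(d) * s.count(str(d)) for d in range(9, -1, -1)))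
-- ===== Notes on version B (the rewrite author's own statement) =====
-- stated objective: idiomatic
-- what changed: B tallies the digits of str(abs(num)) into per-digit counts and constructs the answer directly (smallest nonzero digit first, then the zeros, then the remaining digits ascending; digits descending for negatives), replacing A's character sort plus leading-zero swap loop.
import Mathlib
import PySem

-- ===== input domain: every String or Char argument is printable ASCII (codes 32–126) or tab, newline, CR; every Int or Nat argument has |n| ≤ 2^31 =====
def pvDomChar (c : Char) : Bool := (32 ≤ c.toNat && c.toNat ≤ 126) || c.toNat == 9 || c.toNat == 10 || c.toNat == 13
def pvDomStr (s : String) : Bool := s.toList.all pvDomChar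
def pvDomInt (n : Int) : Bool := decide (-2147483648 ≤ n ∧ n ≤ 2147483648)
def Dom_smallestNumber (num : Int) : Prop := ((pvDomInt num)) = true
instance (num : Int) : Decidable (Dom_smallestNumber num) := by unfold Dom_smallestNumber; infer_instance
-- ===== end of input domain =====

-- B rebuilds the result from a 10-entry digit tally (smallest nonzero digit first, then the zeros,
-- then the rest ascending; descending for negatives) instead of sorting the characters and swapping
-- a leading zero into place; objective: idiomatic, not faster (inputs have at most 11 characters).

-- ===== PORT A =====
-- int(c) for a single character c (A only applies it to digit characters, where it never raises)
def pvDigitVal (c : Char) : Int := (PySem.Int.ofChars? [c]).getD 0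

def smallestNumber (num : Int) : Int :=
  if num ≥ 0 then
    let coll0 := PySem.Int.toChars num                    -- for i in str(num): coll.append(i)
    let coll1 := PySem.List.sorted coll0 (fun c => c) false
    let coll2 :=
      if coll1.length > 1 ∧ pvDigitVal (PySem.List.pyGetD coll1 0 ' ') = 0 then
        -- for i in range(1, len(coll)): if int(coll[i]) != 0: swap; break
        match (PySem.List.pyRange 1 coll1.length 1).find?
            (fun i => decide (pvDigitVal (PySem.List.pyGetD coll1 i ' ') ≠ 0)) with
        | some i => PySem.List.pySetD (PySem.List.pySetD coll1 0 (PySem.List.pyGetD coll1 i ' ')) i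
                      (PySem.List.pyGetD coll1 0 ' ')
        | none => coll1
      else coll1
    (PySem.Int.ofChars? coll2).getD 0                     -- int("".join(coll)); never a ValueError here
  else
    let string := PySem.Int.toChars num
    let coll0 := string.drop 1                            -- for i in range(1, len(string)): coll.append(string[i])
    let coll1 := PySem.List.sorted coll0 (fun c => c) false
    let coll2 := coll1.reverse
    0 - (PySem.Int.ofChars? coll2).getD 0

-- ===== PORT B =====
-- str(d) for a digit d in 0..9 is the single character chr(48+d)
def pvCh (d : Nat) : Char := Char.ofNat (48 + d)
-- s.count(str(d)): a single-character pattern, so Python's substring count equals the character count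
def pvCnt (s : List Char) (d : Nat) : Nat := s.count (pvCh d)

def smallestNumber_alt (num : Int) : Int :=
  let s := PySem.Int.toChars (if num < 0 then -num else num)     -- str(abs(num))
  if num ≥ 0 then
    let lead := ((List.range' 1 9).find? (fun d => decide (pvCnt s d > 0))).getD 0
    let zeros := List.replicate (pvCnt s 0) '0'
    let rest := (List.range' 1 9).flatMap
      (fun d => List.replicate (pvCnt s d - (if d = lead then 1 else 0)) (pvCh d))
    (PySem.Int.ofChars? ((if lead ≠ 0 then [pvCh lead] else []) ++ zeros ++ rest)).getD 0
  else
    - (PySem.Int.ofChars? ((List.range' 0 10).reverse.flatMap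
        (fun d => List.replicate (pvCnt s d) (pvCh d)))).getD 0

-- ===== PRECONDITION & SPEC =====
def Spec_smallestNumber (num : Int) (out : Int) : Prop := out = smallestNumber_alt num
instance (num : Int) (out : Int) : Decidable (Spec_smallestNumber num out) := by
  unfold Spec_smallestNumber; infer_instance

-- ===== CLAIM (what is proved, stated in full; the proofs are below) =====
def Claim_equal_smallestNumber : Prop := ∀ (num : Int), Dom_smallestNumber num → Spec_smallestNumber num (smallestNumber num)

-- ===== LEMMAS AND PROOFS =====

-- every character str(n) produces for a natural n is a digit character chr(48+d), d ≤ 9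
theorem pv_digitChar (k : Nat) (hk : k ≤ 9) : Nat.digitChar k = pvCh k := by
  interval_cases k <;> decide

theorem pv_toDigitsCore_mem (fuel : Nat) : ∀ (n : Nat) (acc : List Char),
    (∀ c ∈ acc, ∃ d, d ≤ 9 ∧ c = pvCh d) →
    ∀ c ∈ Nat.toDigitsCore 10 fuel n acc, ∃ d, d ≤ 9 ∧ c = pvCh d := by
  induction fuel with
  | zero => intro n acc hacc c hc; rw [Nat.toDigitsCore] at hc; exact hacc c hc
  | succ f ih =>
    intro n acc hacc c hc
    rw [Nat.toDigitsCore] at hc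
    have hcons : ∀ c ∈ (n % 10).digitChar :: acc, ∃ d, d ≤ 9 ∧ c = pvCh d := by
      intro c hc
      rcases List.mem_cons.mp hc with rfl | hmem
      · exact ⟨n % 10, by omega, pv_digitChar (n % 10) (by omega)⟩
      · exact hacc c hmem
    by_cases hz : n / 10 = 0
    · simp only [hz] at hc; exact hcons c hc
    · simp only [if_neg hz] at hc; exact ih (n / 10) _ hcons c hc

theorem pv_toDigits_mem (n : Nat) : ∀ c ∈ Nat.toDigits 10 n, ∃ d, d ≤ 9 ∧ c = pvCh d :=
  pv_toDigitsCore_mem (n + 1) n [] (by simp)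

-- the ascending tally expansion of a digit multiset
def pvFlat (ds : List Nat) (c : Nat → Nat) : List Char :=
  ds.flatMap (fun d => List.replicate (c d) (pvCh d))

theorem pv_ch_le (d e : Nat) (hd : d ≤ 9) (he : e ≤ 9) (hde : d ≤ e) : pvCh d ≤ pvCh e := by
  interval_cases d <;> interval_cases e <;> decide

theorem pv_flat_pairwise (c : Nat → Nat) : ∀ (ds : List Nat), (∀ d ∈ ds, d ≤ 9) →
    ds.Pairwise (· ≤ ·) → (pvFlat ds c).Pairwise (fun a b => a ≤ b) := by
  intro ds
  induction ds with
  | nil => intro _ _; simp [pvFlat]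
  | cons d t ih =>
    intro h9 hp
    rw [pvFlat, List.flatMap_cons, List.pairwise_append]
    refine ⟨List.pairwise_replicate.mpr (Or.inr le_rfl),
      ih (fun x hx => h9 x (List.mem_cons_of_mem _ hx)) hp.of_cons, ?_⟩
    intro a ha b hb
    obtain ⟨-, rfl⟩ := List.mem_replicate.mp ha
    obtain ⟨e, he, hbrep⟩ := List.mem_flatMap.mp hb
    obtain ⟨-, rfl⟩ := List.mem_replicate.mp hbrep
    exact pv_ch_le d e (h9 d (List.mem_cons_self)) (h9 e (List.mem_cons_of_mem _ he))
      (List.rel_of_pairwise_cons hp he)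

theorem pv_flat_of_find_some : ∀ (ds : List Nat) (c : Nat → Nat) (m : Nat), ds.Nodup →
    ds.find? (fun d => decide (c d > 0)) = some m →
    pvFlat ds c = pvCh m :: pvFlat ds (fun d => c d - (if d = m then 1 else 0)) := by
  intro ds
  induction ds with
  | nil => intro c m _ h; simp at h
  | cons d t ih =>
    intro c m hnd h
    by_cases hd : c d > 0
    · have hm : m = d := by
        rw [List.find?_cons_of_pos (by simpa using hd)] at h
        exact (Option.some_inj.mp h).symm
      subst hm
      rw [pvFlat, pvFlat, List.flatMap_cons, List.flatMap_cons]
      have hrep : List.replicate (c m) (pvCh m) = pvCh m :: List.replicate (c m - 1) (pvCh m) := by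
        cases hc : c m with
        | zero => omega
        | succ n => simp [List.replicate_succ]
      have htail : t.flatMap (fun d => List.replicate (c d - (if d = m then 1 else 0)) (pvCh d))
          = t.flatMap (fun d => List.replicate (c d) (pvCh d)) := by
        apply List.flatMap_congr
        intro x hx
        have hxm : x ≠ m := by
          intro hxm; subst hxm
          exact (List.nodup_cons.mp hnd).1 hx
        simp [hxm]
      rw [htail, hrep, if_pos rfl]
      simp
    · have hstep : t.find? (fun d => decide (c d > 0)) = some m := by
        rwa [List.find?_cons_of_neg (by simpa using hd)] at h
      have hcm : c m > 0 := by simpa using List.find?_some hstep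
      have hdm : d ≠ m := by intro hdm; subst hdm; omega
      rw [pvFlat, pvFlat, List.flatMap_cons, List.flatMap_cons]
      have hd0 : c d = 0 := by omega
      have := ih c m (List.nodup_cons.mp hnd).2 hstep
      rw [pvFlat, pvFlat] at this
      rw [this]
      simp [hd0, if_neg hdm]

theorem pv_digitVal_pvCh (d : Nat) (hd : d ≤ 9) : pvDigitVal (pvCh d) = (d : Int) := by
  interval_cases d <;> decide

theorem pv_flat_of_find_none (ds : List Nat) (c : Nat → Nat)
    (h : ds.find? (fun d => decide (c d > 0)) = none) : pvFlat ds c = [] := by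
  rw [List.find?_eq_none] at h
  simp only [pvFlat, List.flatMap_eq_nil_iff]
  intro x hx
  have := h x hx
  simp at this
  simp [this]

theorem pv_sorted_eq_flat (l : List Char) (hdig : ∀ c ∈ l, ∃ d, d ≤ 9 ∧ c = pvCh d) :
    PySem.List.sorted l (fun c => c) false = pvFlat (List.range' 0 10) (pvCnt l) := by
  apply PySem.List.sorted_id_eq_of_perm_of_pairwise
  · rw [List.perm_iff_count]
    intro a
    by_cases ha : ∃ d, d ≤ 9 ∧ a = pvCh d
    · obtain ⟨d, hd, rfl⟩ := ha
      interval_cases d <;>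
        simp [pvFlat, pvCnt, show List.range' 0 10 = [0,1,2,3,4,5,6,7,8,9] from rfl,
          List.count_replicate, pvCh]
    · have ha' : ∀ d, d ≤ 9 → a ≠ pvCh d := fun d hd he => ha ⟨d, hd, he⟩
      have hzero : List.count a l = 0 := by
        rw [List.count_eq_zero]
        intro hmem
        obtain ⟨d, hd, rfl⟩ := hdig a hmem
        exact ha' d hd rfl
      rw [hzero, List.count_eq_zero]
      intro hmem
      simp only [pvFlat, List.mem_flatMap, List.mem_replicate] at hmem
      obtain ⟨d, hdmem, -, rfl⟩ := hmem
      exact ha' d (by simp [List.mem_range'] at hdmem; omega) rfl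
  · exact pv_flat_pairwise _ _ (by decide) (by decide)

theorem pv_val0 : pvDigitVal '0' = 0 := by decide

theorem pv_lists_eq (l : List Char) (hdig : ∀ c ∈ l, ∃ d, d ≤ 9 ∧ c = pvCh d) :
    (if (PySem.List.sorted l (fun c => c) false).length > 1 ∧
        pvDigitVal (PySem.List.pyGetD (PySem.List.sorted l (fun c => c) false) 0 ' ') = 0 then
      match (PySem.List.pyRange 1 (PySem.List.sorted l (fun c => c) false).length 1).find?
          (fun i => decide (pvDigitVal (PySem.List.pyGetD (PySem.List.sorted l (fun c => c) false) i ' ') ≠ 0)) with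
      | some i => PySem.List.pySetD (PySem.List.pySetD (PySem.List.sorted l (fun c => c) false) 0
            (PySem.List.pyGetD (PySem.List.sorted l (fun c => c) false) i ' ')) i
            (PySem.List.pyGetD (PySem.List.sorted l (fun c => c) false) 0 ' ')
      | none => PySem.List.sorted l (fun c => c) false
     else PySem.List.sorted l (fun c => c) false) =
    ((if (((List.range' 1 9).find? (fun d => decide (pvCnt l d > 0))).getD 0) ≠ 0
        then [pvCh (((List.range' 1 9).find? (fun d => decide (pvCnt l d > 0))).getD 0)] else []) ++
      List.replicate (pvCnt l 0) '0' ++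
      (List.range' 1 9).flatMap
        (fun d => List.replicate (pvCnt l d -
          (if d = (((List.range' 1 9).find? (fun d => decide (pvCnt l d > 0))).getD 0) then 1 else 0)) (pvCh d))) := by
  rw [pv_sorted_eq_flat l hdig]
  rw [show pvFlat (List.range' 0 10) (pvCnt l) =
      List.replicate (pvCnt l 0) '0' ++ pvFlat (List.range' 1 9) (pvCnt l) from rfl]
  cases hf : (List.range' 1 9).find? (fun d => decide (pvCnt l d > 0)) with
  | none =>
    have hR : pvFlat (List.range' 1 9) (pvCnt l) = [] := pv_flat_of_find_none _ _ hf
    have hrest : (List.range' 1 9).flatMap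
        (fun d => List.replicate (pvCnt l d - (if d = (Option.getD (none : Option Nat) 0) then 1 else 0)) (pvCh d)) = [] := by
      rw [List.flatMap_eq_nil_iff]
      intro x hx
      have := List.find?_eq_none.mp hf x hx
      simp at this
      simp [this]
    rw [hR, hrest]
    simp only [Option.getD_none, List.append_nil]
    rw [if_neg (show ¬((0:Nat) ≠ 0) from by omega), List.nil_append]
    by_cases hk1 : pvCnt l 0 ≤ 1
    · rw [if_neg (show ¬((List.replicate (pvCnt l 0) '0').length > 1 ∧
          pvDigitVal (PySem.List.pyGetD (List.replicate (pvCnt l 0) '0') 0 ' ') = 0) from by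
        rintro ⟨h1, -⟩
        simp at h1
        omega)]
    · have hget : pvDigitVal (PySem.List.pyGetD (List.replicate (pvCnt l 0) '0') 0 ' ') = 0 := by
        rw [PySem.List.pyGetD_zero]
        have h : pvCnt l 0 = (pvCnt l 0 - 1) + 1 := by omega
        rw [h, List.replicate_succ]
        simp [pv_val0]
      rw [if_pos ⟨by simp; omega, hget⟩]
      have hfind : (PySem.List.pyRange 1 ((List.replicate (pvCnt l 0) '0').length : Int) 1).find?
          (fun i => decide (pvDigitVal (PySem.List.pyGetD (List.replicate (pvCnt l 0) '0') i ' ') ≠ 0)) = none := by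
        rw [List.find?_eq_none]
        intro i hi
        rw [PySem.List.mem_pyRange_one] at hi
        rw [PySem.List.pyGetD_eq_getElem _ _ (by omega) (by simpa using hi.2)]
        simp [List.getElem_replicate, pv_val0]
      rw [hfind]
  | some m =>
    have hmr : m ∈ List.range' 1 9 := List.mem_of_find?_eq_some hf
    have hm1 : 1 ≤ m ∧ m ≤ 9 := by simp [List.mem_range'] at hmr; omega
    have hcm : pvCnt l m > 0 := by simpa using List.find?_some hf
    have hR := pv_flat_of_find_some (List.range' 1 9) (pvCnt l) m (List.nodup_range' 1) hf
    rw [hR]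
    simp only [Option.getD_some]
    rw [if_pos (show m ≠ 0 from by omega)]
    set R' := pvFlat (List.range' 1 9) (fun d => pvCnt l d - (if d = m then 1 else 0)) with hR'
    set k := pvCnt l 0 with hkdef
    have hvm : pvDigitVal (pvCh m) = (m : Int) := pv_digitVal_pvCh m (by omega)
    by_cases hk0 : k = 0
    · rw [hk0]
      simp only [List.replicate_zero, List.nil_append]
      rw [if_neg]
      · rfl
      · rw [PySem.List.pyGetD_zero]
        simp only [List.getD_cons_zero]
        rw [hvm]
        rintro ⟨-, hm0⟩
        omega
    · have hk1 : 1 ≤ k := by omega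
      have hcons : List.replicate k '0' = '0' :: List.replicate (k-1) '0' := by
        cases hkc : k with
        | zero => omega
        | succ n => simp [List.replicate_succ]
      have hget0 : PySem.List.pyGetD (List.replicate k '0' ++ pvCh m :: R') 0 ' ' = '0' := by
        rw [PySem.List.pyGetD_zero, hcons]
        simp
      have hlen : (List.replicate k '0' ++ pvCh m :: R').length = k + R'.length + 1 := by
        simp
        omega
      have hgetk : PySem.List.pyGetD (List.replicate k '0' ++ pvCh m :: R') (k : Int) ' ' = pvCh m := by
        rw [PySem.List.pyGetD_eq_getElem _ _ (by omega) (by rw [hlen]; push_cast; omega)]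
        simp only [Int.toNat_natCast]
        rw [List.getElem_append_right (by simp)]
        simp
      rw [if_pos ⟨by rw [hlen]; omega, by rw [hget0]; decide⟩]
      have hfind : (PySem.List.pyRange 1 ((List.replicate k '0' ++ pvCh m :: R').length : Int) 1).find?
          (fun i => decide (pvDigitVal (PySem.List.pyGetD (List.replicate k '0' ++ pvCh m :: R') i ' ') ≠ 0))
          = some (k : Int) := by
        rw [PySem.List.pyRange_one_append 1 (k : Int) _ (by omega) (by rw [hlen]; push_cast; omega)]
        rw [List.find?_append]
        have h1 : (PySem.List.pyRange 1 (k : Int) 1).find?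
            (fun i => decide (pvDigitVal (PySem.List.pyGetD (List.replicate k '0' ++ pvCh m :: R') i ' ') ≠ 0)) = none := by
          rw [List.find?_eq_none]
          intro i hi
          rw [PySem.List.mem_pyRange_one] at hi
          rw [PySem.List.pyGetD_eq_getElem _ _ (by omega) (by rw [hlen]; push_cast; omega)]
          rw [List.getElem_append_left (by simp; omega)]
          simp [List.getElem_replicate, pv_val0]
        rw [h1, Option.none_or]
        rw [PySem.List.pyRange_one_cons (by rw [hlen]; push_cast; omega)]
        apply List.find?_cons_of_pos
        rw [hgetk, hvm]
        simp
        omega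
      rw [hfind]
      rw [show (match (some (k : Int)) with
            | some i => PySem.List.pySetD (PySem.List.pySetD (List.replicate k '0' ++ pvCh m :: R') 0
                  (PySem.List.pyGetD (List.replicate k '0' ++ pvCh m :: R') i ' ')) i
                  (PySem.List.pyGetD (List.replicate k '0' ++ pvCh m :: R') 0 ' ')
            | none => List.replicate k '0' ++ pvCh m :: R') =
          PySem.List.pySetD (PySem.List.pySetD (List.replicate k '0' ++ pvCh m :: R') 0
                  (PySem.List.pyGetD (List.replicate k '0' ++ pvCh m :: R') (k : Int) ' ')) (k : Int)
                  (PySem.List.pyGetD (List.replicate k '0' ++ pvCh m :: R') 0 ' ') from rfl]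
      rw [hgetk, hget0]
      have hset1 : PySem.List.pySetD (List.replicate k '0' ++ pvCh m :: R') 0 (pvCh m)
          = pvCh m :: (List.replicate (k-1) '0' ++ pvCh m :: R') := by
        rw [PySem.List.pySetD_of_nonneg _ _ (by omega), hcons]
        simp
      rw [hset1]
      have hset2 : ∀ (j : Nat) (L : List Char),
          PySem.List.pySetD (pvCh m :: (List.replicate j '0' ++ pvCh m :: L)) (((j+1 : Nat) : Int)) '0'
          = pvCh m :: (List.replicate j '0' ++ '0' :: L) := by
        intro j L
        rw [PySem.List.pySetD_natCast, List.set_cons_succ, List.set_append, if_neg (by simp)]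
        simp
      rw [show (k : Int) = (((k-1)+1 : Nat) : Int) from by omega, hset2 (k-1) R']
      have hrep : List.replicate k '0' = List.replicate (k-1) '0' ++ ['0'] := by
        rw [show k = (k-1)+1 from by omega, List.replicate_succ']
        simp
      rw [hrep]
      simp [hR', pvFlat]
      rfl

-- ===== VERDICT (by name: the statement is the Claim_ definition above) =====
theorem smallestNumber_spec : Claim_equal_smallestNumber := by
  intro num _
  unfold Spec_smallestNumber
  by_cases h : num ≥ 0
  · have hneg : ¬ num < 0 := by omega
    have hdig : ∀ c ∈ PySem.Int.toChars num, ∃ d, d ≤ 9 ∧ c = pvCh d := by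
      rw [PySem.Int.toChars, if_neg hneg]
      exact pv_toDigits_mem num.toNat
    simp only [smallestNumber, smallestNumber_alt, h, hneg, if_true, if_false]
    exact congrArg (fun x => (PySem.Int.ofChars? x).getD 0) (pv_lists_eq (PySem.Int.toChars num) hdig)
  · have hneg : num < 0 := by omega
    simp only [smallestNumber, smallestNumber_alt, h, hneg, if_true, if_false]
    have htc : PySem.Int.toChars num = '-' :: Nat.toDigits 10 num.natAbs := by
      rw [PySem.Int.toChars, if_pos hneg]
    have htc2 : PySem.Int.toChars (-num) = Nat.toDigits 10 num.natAbs := by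
      rw [PySem.Int.toChars, if_neg (by omega)]
      congr 1
      omega
    rw [htc, htc2]
    simp only [List.drop_succ_cons, List.drop_zero]
    rw [pv_sorted_eq_flat (Nat.toDigits 10 num.natAbs) (pv_toDigits_mem num.natAbs)]
    have hrev : (pvFlat (List.range' 0 10) (pvCnt (Nat.toDigits 10 num.natAbs))).reverse
        = (List.range' 0 10).reverse.flatMap
            (fun d => List.replicate (pvCnt (Nat.toDigits 10 num.natAbs) d) (pvCh d)) := by
      rw [pvFlat, List.reverse_flatMap]
      apply List.flatMap_congr
      intro x hx
      simp [List.reverse_replicate]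
    rw [hrev]
    omega
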